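-- pv_equiv track=rewrite | github.com/yangcatherine/4300-Big-Red-Planner | src/routes.py | _section_combinations
-- ===== SOURCE A (Python) =====
-- from itertools import product
--
-- def _section_combinations(course: dict) -> list[list[dict]]:
--     sections = course.get("sections", [])
--     if not sections:
--         return [[]]
--     by_type = {}
--     for sec in sections:
--         t = sec.get("type", "UNT")
--         by_type.setdefault(t, []).append(sec)
--     return [list(combo) for combo in product(*by_type.values())]
-- ===== SOURCE B (Python) =====
-- def _section_combinations(course: dict) -> list[list[dict]]:
--     sections = course.get("sections", [])
--     if not sections:
--         return [[]]
--     # ordered distinct types (first occurrence order)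
--     types = []
--     for sec in sections:
--         t = sec.get("type", "UNT")
--         if t not in types:
--             types.append(t)
--
--     def rec(ts):
--         if not ts:
--             return [[]]
--         head, rest = ts[0], ts[1:]
--         tails = rec(rest)
--         return [[sec] + tail
--                 for sec in sections if sec.get("type", "UNT") == head
--                 for tail in tails]
--
--     return rec(types)
-- ===== Notes on version B (the rewrite author's own statement) =====
-- stated objective: alternative
-- what changed: B never builds the type->sections dict or calls itertools.product: it collects the ordered distinct types in one pass and then recursively builds the combinations type-by-type, filtering sections for each type.
import Mathlib
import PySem

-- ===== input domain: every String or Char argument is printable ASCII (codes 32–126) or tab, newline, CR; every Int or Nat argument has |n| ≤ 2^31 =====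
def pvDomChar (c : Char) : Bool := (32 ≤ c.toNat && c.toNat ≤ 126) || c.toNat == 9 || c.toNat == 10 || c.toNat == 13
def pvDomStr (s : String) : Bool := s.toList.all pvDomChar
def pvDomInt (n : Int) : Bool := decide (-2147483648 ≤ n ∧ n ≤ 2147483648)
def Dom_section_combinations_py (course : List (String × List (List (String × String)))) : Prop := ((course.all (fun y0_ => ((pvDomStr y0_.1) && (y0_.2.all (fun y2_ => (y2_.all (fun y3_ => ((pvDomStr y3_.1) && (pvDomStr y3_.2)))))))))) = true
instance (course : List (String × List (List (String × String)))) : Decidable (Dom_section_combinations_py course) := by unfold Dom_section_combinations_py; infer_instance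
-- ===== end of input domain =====

-- B replaces the dict-grouping + itertools.product pipeline by collecting the ordered distinct
-- types and recursively building combinations by filtering sections per type (objective: alternative).


-- sec.get("type", "UNT") (shared trivial accessor)
def pvSecType (sec : List (String × String)) : String :=
  (PySem.Dict.mk sec).getD "type" "UNT"

-- ===== PORT A =====
-- itertools.product(*groups), each tuple as a list (first group varies slowest)
def pvProductA (gs : List (List (List (String × String)))) : List (List (List (String × String))) :=
  match gs with
  | [] => [[]]
  | g :: rest => g.flatMap (fun x => (pvProductA rest).map (fun c => x :: c))

def section_combinations_py (course : List (String × List (List (String × String)))) : List (List (List (String × String))) :=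
  let sections := (PySem.Dict.mk course).getD "sections" []
  if sections = [] then [[]]
  else
    -- by_type.setdefault(t, []).append(sec)  ==  modify t [] (· ++ [sec])
    let by_type := sections.foldl
      (fun d sec => d.modify (pvSecType sec) [] (fun v => v ++ [sec]))
      PySem.Dict.empty
    (pvProductA by_type.values).map (fun combo => combo)

-- ===== PORT B =====
-- rec(ts): combinations over the remaining distinct types, filtering sections per type
def pvCombosB (sections : List (List (String × String))) : List String → List (List (List (String × String)))
  | [] => [[]]
  | t :: rest =>
      let tails := pvCombosB sections rest
      (sections.filter (fun s => pvSecType s == t)).flatMap (fun s => tails.map (fun c => s :: c))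

def section_combinations_py_alt (course : List (String × List (List (String × String)))) : List (List (List (String × String))) :=
  let sections := (PySem.Dict.mk course).getD "sections" []
  if sections = [] then [[]]
  else
    let types := sections.foldl
      (fun ts s => if pvSecType s ∈ ts then ts else ts ++ [pvSecType s]) []
    pvCombosB sections types

-- ===== PRECONDITION & SPEC =====
def Spec_section_combinations_py (course : List (String × List (List (String × String)))) (out : List (List (List (String × String)))) : Prop := out = section_combinations_py_alt course
instance (course : List (String × List (List (String × String)))) (out : List (List (List (String × String)))) : Decidable (Spec_section_combinations_py course out) := by unfold Spec_section_combinations_py; infer_instance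

-- ===== CLAIM (what is proved, stated in full; the proofs are below) =====
def Claim_equal_section_combinations_py : Prop := ∀ (course : List (String × List (List (String × String)))), Dom_section_combinations_py course → Spec_section_combinations_py course (section_combinations_py course)

-- ===== LEMMAS AND PROOFS =====

-- abbreviations (proof-side only)
def pvGroup (l : List (List (String × String))) : PySem.Dict String (List (List (String × String))) :=
  l.foldl (fun d sec => d.modify (pvSecType sec) [] (fun v => v ++ [sec])) PySem.Dict.empty

def pvTypes (l : List (List (String × String))) : List String :=
  l.foldl (fun ts s => if pvSecType s ∈ ts then ts else ts ++ [pvSecType s]) []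

theorem pvGroup_getD (l : List (List (String × String)))
    (d : PySem.Dict String (List (List (String × String)))) (t : String) :
    (l.foldl (fun d sec => d.modify (pvSecType sec) [] (fun v => v ++ [sec])) d).getD t []
      = d.getD t [] ++ l.filter (fun s => pvSecType s == t) := by
  induction l generalizing d with
  | nil => simp
  | cons x xs ih =>
      simp only [List.foldl_cons, ih, List.filter_cons, PySem.Dict.getD_modify]
      by_cases h : t = pvSecType x
      · subst h; simp
      · have : (pvSecType x == t) = false := by
          simp [Ne.symm h]
        simp [h, this]

theorem pvGroup_keys (l : List (List (String × String)))
    (d : PySem.Dict String (List (List (String × String)))) :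
    (l.foldl (fun d sec => d.modify (pvSecType sec) [] (fun v => v ++ [sec])) d).keys
      = l.foldl (fun ts s => if pvSecType s ∈ ts then ts else ts ++ [pvSecType s]) d.keys := by
  induction l generalizing d with
  | nil => rfl
  | cons x xs ih =>
      simp only [List.foldl_cons, ih, PySem.Dict.keys_modify]
      by_cases h : pvSecType x ∈ d.keys
      · rw [PySem.Dict.keys_insert_of_contains _ _
          (by simp [PySem.Dict.contains_eq_decide_mem_keys, h]), if_pos h]
      · rw [PySem.Dict.keys_insert_of_not_contains _ _
          (by simp [PySem.Dict.contains_eq_decide_mem_keys, h]), if_neg h]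

theorem pvGroup_nodup (l : List (List (String × String))) : (pvGroup l).keys.Nodup :=
  PySem.Dict.nodup_keys_foldl_modify_key l pvSecType [] (fun d x v => v ++ [x]) PySem.Dict.empty
    PySem.Dict.nodup_keys_empty

theorem values_eq_keys_map {ν : Type} (d : PySem.Dict String ν) (d0 : ν) (h : d.keys.Nodup) :
    d.values = d.keys.map (fun k => d.getD k d0) := by
  show d.items.map (fun p => p.2) = (d.items.map (fun p => p.1)).map (fun k => d.getD k d0)
  rw [List.map_map]
  apply List.map_congr_left
  intro p hp
  exact (PySem.Dict.getD_of_mem_items d (show (p.1, p.2) ∈ d.items by simpa using hp) h d0).symm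

theorem pvGroup_values (l : List (List (String × String))) :
    (pvGroup l).values = (pvTypes l).map (fun t => l.filter (fun s => pvSecType s == t)) := by
  rw [values_eq_keys_map (pvGroup l) [] (pvGroup_nodup l)]
  have hk : (pvGroup l).keys = pvTypes l := by
    have := pvGroup_keys l PySem.Dict.empty
    simpa [pvGroup, pvTypes, PySem.Dict.keys_empty] using this
  rw [hk]
  apply List.map_congr_left
  intro t _
  have := pvGroup_getD l PySem.Dict.empty t
  simpa [pvGroup, PySem.Dict.getD_empty] using this

theorem pvProduct_eq_combos (l : List (List (String × String))) (ts : List String) :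
    pvProductA (ts.map (fun t => l.filter (fun s => pvSecType s == t))) = pvCombosB l ts := by
  induction ts with
  | nil => rfl
  | cons t rest ih => simp [pvProductA, pvCombosB, ih]

theorem section_combinations_py_spec : Claim_equal_section_combinations_py := by
  intro course _
  show section_combinations_py course = section_combinations_py_alt course
  unfold section_combinations_py section_combinations_py_alt
  simp only []
  by_cases h : (PySem.Dict.mk course).getD "sections" [] = ([] : List (List (String × String)))
  · simp [h]
  · simp only [if_neg h]
    rw [show (((PySem.Dict.mk course).getD "sections" []).foldl
          (fun d sec => d.modify (pvSecType sec) [] (fun v => v ++ [sec])) PySem.Dict.empty)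
        = pvGroup ((PySem.Dict.mk course).getD "sections" []) from rfl,
        pvGroup_values, pvProduct_eq_combos]
    simp [pvTypes]
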